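-- pv_equiv track=rewrite | github.com/fubostudy/Artificial-Intelligence-and-Machine-Learning | 汉诺塔&修道士&八皇后问题/NQueen.py | conflict_judge
-- ===== SOURCE A (Python) =====
-- def conflict_judge(columnlist):
--     conflict_num = 0
--     for i in range(len(columnlist)):
--         for j in range(i + 1, len(columnlist)):
--             # 是否为同一列
--             if columnlist[i] == columnlist[j]:
--                 conflict_num += 1
--             diagonal_judge = j - i
--             if abs(columnlist[i] - columnlist[j]) == diagonal_judge:
--             # 是否为对角线
--                 conflict_num += 1
--     return conflict_num
-- ===== SOURCE B (Python) =====
-- def conflict_judge(columnlist):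
--     cols = {}
--     diag1 = {}
--     diag2 = {}
--     conflict_num = 0
--     for i, c in enumerate(columnlist):
--         conflict_num += cols.get(c, 0) + diag1.get(c - i, 0) + diag2.get(c + i, 0)
--         cols[c] = cols.get(c, 0) + 1
--         diag1[c - i] = diag1.get(c - i, 0) + 1
--         diag2[c + i] = diag2.get(c + i, 0) + 1
--     return conflict_num
-- ===== Notes on version B (the rewrite author's own statement) =====
-- stated objective: faster
-- what changed: Replaces the O(n^2) all-pairs double loop with a single pass that keeps hash counters of columns, of column-index and of column+index, adding the number of earlier matching queens at each step (a pair conflicts on a diagonal iff it shares one of those two keys).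
import Mathlib
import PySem

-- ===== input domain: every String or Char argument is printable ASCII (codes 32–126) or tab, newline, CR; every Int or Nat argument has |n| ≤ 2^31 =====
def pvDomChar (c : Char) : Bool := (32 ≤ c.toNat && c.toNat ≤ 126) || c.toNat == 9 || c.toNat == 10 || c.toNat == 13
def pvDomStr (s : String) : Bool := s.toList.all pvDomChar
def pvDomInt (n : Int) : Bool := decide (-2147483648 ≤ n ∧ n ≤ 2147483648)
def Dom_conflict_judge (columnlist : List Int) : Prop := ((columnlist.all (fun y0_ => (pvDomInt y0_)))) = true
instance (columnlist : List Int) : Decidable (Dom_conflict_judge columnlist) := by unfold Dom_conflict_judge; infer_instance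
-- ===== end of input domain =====

-- B replaces A's O(n^2) all-pairs double loop by one pass with counters of
-- columns, column-index and column+index (asymptotically faster).

-- ===== PORT A =====
def conflict_judge (columnlist : List Int) : Int :=
  (PySem.List.pyRange 0 (columnlist.length : Int) 1).foldl (fun acc i =>
    (PySem.List.pyRange (i + 1) (columnlist.length : Int) 1).foldl (fun acc j =>
      let acc := if PySem.List.pyGetD columnlist i 0 = PySem.List.pyGetD columnlist j 0
                 then acc + 1 else acc
      let diagonal_judge := j - i
      if |PySem.List.pyGetD columnlist i 0 - PySem.List.pyGetD columnlist j 0| = diagonal_judge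
      then acc + 1 else acc) acc) 0

-- ===== PORT B =====
def pvStepB (s : PySem.Dict Int Int × PySem.Dict Int Int × PySem.Dict Int Int × Int)
    (p : Int × Int) : PySem.Dict Int Int × PySem.Dict Int Int × PySem.Dict Int Int × Int :=
  let cols := s.1; let diag1 := s.2.1; let diag2 := s.2.2.1; let acc := s.2.2.2
  let i := p.1; let c := p.2
  let acc := acc + cols.getD c 0 + diag1.getD (c - i) 0 + diag2.getD (c + i) 0
  (cols.insert c (cols.getD c 0 + 1),
   diag1.insert (c - i) (diag1.getD (c - i) 0 + 1),
   diag2.insert (c + i) (diag2.getD (c + i) 0 + 1),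
   acc)

def conflict_judge_alt (columnlist : List Int) : Int :=
  ((PySem.List.enumerate columnlist 0).foldl pvStepB
    (PySem.Dict.empty, PySem.Dict.empty, PySem.Dict.empty, 0)).2.2.2

-- ===== PRECONDITION & SPEC =====
def Spec_conflict_judge (columnlist : List Int) (out : Int) : Prop := out = conflict_judge_alt columnlist
instance (columnlist : List Int) (out : Int) : Decidable (Spec_conflict_judge columnlist out) := by unfold Spec_conflict_judge; infer_instance

-- ===== CLAIM (what is proved, stated in full; the proofs are below) =====
def Claim_equal_conflict_judge : Prop := ∀ (columnlist : List Int), Dom_conflict_judge columnlist → Spec_conflict_judge columnlist (conflict_judge columnlist)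

-- ===== LEMMAS AND PROOFS =====

-- conflicts of a new queen x in column x, appended at index ys.length, against ys
def pvNew (ys : List Int) (x : Int) : Int :=
  ((PySem.List.enumerate ys 0).map (fun p =>
    (if p.2 = x then (1 : Int) else 0) +
    (if |p.2 - x| = (ys.length : Int) - p.1 then (1 : Int) else 0))).sum

-- total pair count, by recursion on the reversed list
def pvPrev : List Int → Int
  | [] => 0
  | x :: rest => pvPrev rest + pvNew rest.reverse x

def pvP (xs : List Int) : Int := pvPrev xs.reverse

theorem pvP_append (ys : List Int) (x : Int) : pvP (ys ++ [x]) = pvP ys + pvNew ys x := by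
  simp [pvP, pvPrev]

theorem sum_ite_count {α : Type} [DecidableEq α] (l : List α) (v : α) :
    (l.map (fun c => if c = v then (1 : Int) else 0)).sum = (l.count v : Int) := by
  induction l with
  | nil => simp
  | cons a t ih =>
    simp only [List.map_cons, List.sum_cons, List.count_cons, ih, beq_iff_eq]
    split_ifs with h <;> push_cast <;> ring

theorem pvNew_counts (ys : List Int) (x : Int) :
    pvNew ys x =
      ((ys.count x : Int)
        + (((PySem.List.enumerate ys 0).map (fun p => p.2 - p.1)).count (x - (ys.length : Int)) : Int))
        + (((PySem.List.enumerate ys 0).map (fun p => p.2 + p.1)).count (x + (ys.length : Int)) : Int) := by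
  have hmem : ∀ p ∈ PySem.List.enumerate ys 0,
      ((if p.2 = x then (1 : Int) else 0) +
        (if |p.2 - x| = (ys.length : Int) - p.1 then (1 : Int) else 0))
      = ((if p.2 = x then (1 : Int) else 0) +
          (if p.2 - p.1 = x - (ys.length : Int) then (1 : Int) else 0)) +
        (if p.2 + p.1 = x + (ys.length : Int) then (1 : Int) else 0) := by
    intro p hp
    rw [PySem.List.mem_enumerate_iff] at hp
    obtain ⟨k, hk, rfl⟩ := hp
    simp only [zero_add]
    rcases abs_cases (ys[k] - x) with ⟨h1, h2⟩ | ⟨h1, h2⟩ <;> split_ifs <;> omega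
  unfold pvNew
  rw [List.map_congr_left hmem, PySem.List.sum_map_add_int (PySem.List.enumerate ys 0)
        (fun p => (if p.2 = x then (1 : Int) else 0) +
          (if p.2 - p.1 = x - (ys.length : Int) then (1 : Int) else 0))
        (fun p => if p.2 + p.1 = x + (ys.length : Int) then (1 : Int) else 0),
      PySem.List.sum_map_add_int (PySem.List.enumerate ys 0)
        (fun p => if p.2 = x then (1 : Int) else 0)
        (fun p => if p.2 - p.1 = x - (ys.length : Int) then (1 : Int) else 0)]
  congr 1
  · congr 1
    · have : (PySem.List.enumerate ys 0).map (fun p => if p.2 = x then (1 : Int) else 0)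
          = ((PySem.List.enumerate ys 0).map (fun p => p.2)).map (fun c => if c = x then (1 : Int) else 0) := by
        rw [List.map_map]; rfl
      rw [this, PySem.List.map_snd_enumerate, sum_ite_count]
    · have : (PySem.List.enumerate ys 0).map (fun p => if p.2 - p.1 = x - (ys.length : Int) then (1 : Int) else 0)
          = ((PySem.List.enumerate ys 0).map (fun p => p.2 - p.1)).map
              (fun c => if c = x - (ys.length : Int) then (1 : Int) else 0) := by
        rw [List.map_map]; rfl
      rw [this, sum_ite_count]
  · have : (PySem.List.enumerate ys 0).map (fun p => if p.2 + p.1 = x + (ys.length : Int) then (1 : Int) else 0)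
        = ((PySem.List.enumerate ys 0).map (fun p => p.2 + p.1)).map
            (fun c => if c = x + (ys.length : Int) then (1 : Int) else 0) := by
      rw [List.map_map]; rfl
    rw [this, sum_ite_count]

-- the state of B's fold after processing ys
theorem counter_snoc {α : Type} [DecidableEq α] (l : List α) (x : α) :
    PySem.Dict.counter (l ++ [x]) = (PySem.Dict.counter l).insert x ((PySem.Dict.counter l).getD x 0 + 1) := by
  rw [← PySem.Dict.foldl_insert_getD_add_one_eq_counter, ← PySem.Dict.foldl_insert_getD_add_one_eq_counter,
      List.foldl_append]
  rfl

theorem pvB_state (ys : List Int) :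
    (PySem.List.enumerate ys 0).foldl pvStepB
      (PySem.Dict.empty, PySem.Dict.empty, PySem.Dict.empty, 0) =
    (PySem.Dict.counter ys,
     PySem.Dict.counter ((PySem.List.enumerate ys 0).map (fun p => p.2 - p.1)),
     PySem.Dict.counter ((PySem.List.enumerate ys 0).map (fun p => p.2 + p.1)),
     pvP ys) := by
  induction ys using List.reverseRecOn with
  | nil => rfl
  | append_singleton ys x ih =>
    rw [PySem.List.enumerate_append, List.foldl_append, ih]
    simp only [PySem.List.enumerate_cons, PySem.List.enumerate_nil, List.foldl_cons, List.foldl_nil,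
      List.map_append, List.map_cons, List.map_nil, zero_add]
    rw [pvP_append, pvNew_counts, counter_snoc, counter_snoc, counter_snoc]
    simp [pvStepB, PySem.Dict.getD_counter]
    ring

theorem pvB_eq_P (ys : List Int) : conflict_judge_alt ys = pvP ys := by
  simp [conflict_judge_alt, pvB_state]

def pvContrib (zs : List Int) (i j : Int) : Int :=
  (if PySem.List.pyGetD zs i 0 = PySem.List.pyGetD zs j 0 then 1 else 0) +
  (if |PySem.List.pyGetD zs i 0 - PySem.List.pyGetD zs j 0| = j - i then 1 else 0)

theorem pvA_sum (zs : List Int) :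
    conflict_judge zs =
      ((PySem.List.pyRange 0 (zs.length : Int) 1).map (fun i =>
        ((PySem.List.pyRange (i + 1) (zs.length : Int) 1).map (pvContrib zs i)).sum)).sum := by
  unfold conflict_judge
  rw [PySem.List.foldl_congr_mem _ _
    (fun acc i => acc + ((PySem.List.pyRange (i + 1) (zs.length : Int) 1).map (pvContrib zs i)).sum) 0
    (by
      intro acc i _
      rw [PySem.List.foldl_congr_mem _ _ (fun acc j => acc + pvContrib zs i j) acc
        (by
          intro a j _
          simp only [pvContrib]
          split_ifs <;> ring)]
      rw [PySem.List.foldl_add])]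
  rw [PySem.List.foldl_add]
  simp

theorem pvGetD_append_left (ys : List Int) (x : Int) (i : Int) (h0 : 0 ≤ i)
    (h1 : i < (ys.length : Int)) :
    PySem.List.pyGetD (ys ++ [x]) i 0 = PySem.List.pyGetD ys i 0 := by
  rw [PySem.List.pyGetD_eq_getElem _ _ h0 (by simp; omega),
      PySem.List.pyGetD_eq_getElem _ _ h0 h1,
      List.getElem_append_left (by omega)]

theorem pvGetD_append_last (ys : List Int) (x : Int) :
    PySem.List.pyGetD (ys ++ [x]) (ys.length : Int) 0 = x := by
  rw [PySem.List.pyGetD_eq_getElem _ _ (by positivity) (by simp)]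
  simp

theorem pvA_eq_P (ys : List Int) : conflict_judge ys = pvP ys := by
  rw [pvA_sum]
  induction ys using List.reverseRecOn with
  | nil => rfl
  | append_singleton ys x ih =>
    have hn : ((ys ++ [x]).length : Int) = (ys.length : Int) + 1 := by simp
    have hn0 : (0 : Int) ≤ (ys.length : Int) := by positivity
    rw [hn, PySem.List.pyRange_one_succ_right hn0, List.map_append, List.sum_append]
    have hlast : ((PySem.List.pyRange ((ys.length : Int) + 1) ((ys.length : Int) + 1) 1).map
        (pvContrib (ys ++ [x]) (ys.length : Int))).sum = 0 := by
      rw [PySem.List.pyRange_one_eq_nil (le_refl _)]; rfl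
    simp only [List.map_cons, List.map_nil, List.sum_cons, List.sum_nil, hlast, add_zero]
    have hrow : ∀ i ∈ PySem.List.pyRange 0 (ys.length : Int) 1,
        ((PySem.List.pyRange (i + 1) ((ys.length : Int) + 1) 1).map
          (pvContrib (ys ++ [x]) i)).sum
        = ((PySem.List.pyRange (i + 1) (ys.length : Int) 1).map (pvContrib ys i)).sum
          + ((if PySem.List.pyGetD ys i 0 = x then (1 : Int) else 0) +
             (if |PySem.List.pyGetD ys i 0 - x| = (ys.length : Int) - i then (1 : Int) else 0)) := by
      intro i hi
      rw [PySem.List.mem_pyRange_one] at hi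
      rw [PySem.List.pyRange_one_succ_right (by omega), List.map_append, List.sum_append]
      congr 1
      · apply congrArg
        apply List.map_congr_left
        intro j hj
        rw [PySem.List.mem_pyRange_one] at hj
        simp only [pvContrib]
        rw [pvGetD_append_left ys x i hi.1 (by omega),
            pvGetD_append_left ys x j (by omega) (by omega)]
      · simp only [List.map_cons, List.map_nil, List.sum_cons, List.sum_nil, add_zero, pvContrib]
        rw [pvGetD_append_left ys x i hi.1 (by omega), pvGetD_append_last]
    rw [List.map_congr_left hrow, PySem.List.sum_map_add_int, pvP_append, ← ih]
    congr 1
    unfold pvNew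
    rw [PySem.List.enumerate_eq_map_pyRange ys 0, List.map_map]
    rfl

-- ===== VERDICT (by name: the statement is the Claim_ definition above) =====
theorem conflict_judge_spec : Claim_equal_conflict_judge := by
  intro xs _
  unfold Spec_conflict_judge
  rw [pvA_eq_P, pvB_eq_P]
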